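-- pv_equiv track=rewrite | github.com/pypi-data/pypi-mirror-94 | packages/yangsuite-coverage/yangsuite_coverage-2.2.9-py3-none-any.whl/yscoverage/precommit.py | remove_excluded_xpaths
-- ===== SOURCE A (Python) =====
-- def remove_excluded_xpaths(trim_missing_tc,
--                            modelname,
--                            excluded_xpaths):
--     """Remove exception xpaths from missing test cases.
--        Check a missing test case against the exclusion list.
--
--     Args:
--         trim_missing_tc (set): missing test cases
--         modelname (str): model name
--         excluded_xpaths(list): excluded xpaths
--
--     Return:
--         (set): A set of trim missing test paths
--     """
--     trim_exception_tc = set()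
--
--     for xpath in excluded_xpaths:
--         for missing_tc in trim_missing_tc:
--             if missing_tc.startswith(xpath):
--                 trim_exception_tc.add(missing_tc)
--
--     final_set = trim_missing_tc - trim_exception_tc
--     return final_set
-- ===== SOURCE B (Python) =====
-- def remove_excluded_xpaths(trim_missing_tc, modelname, excluded_xpaths):
--     return {tc for tc in trim_missing_tc
--             if not any(tc.startswith(x) for x in excluded_xpaths)}
-- ===== Notes on version B (the rewrite author's own statement) =====
-- stated objective: faster
-- what changed: A builds an exclusion set with a full nested loop over every (excluded_xpath, missing_tc) pair and then takes a set difference; B does one pass over the missing test cases, keeping each unless any() excluded xpath is a prefix, short-circuiting on the first match and building no intermediate set.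
import Mathlib
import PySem

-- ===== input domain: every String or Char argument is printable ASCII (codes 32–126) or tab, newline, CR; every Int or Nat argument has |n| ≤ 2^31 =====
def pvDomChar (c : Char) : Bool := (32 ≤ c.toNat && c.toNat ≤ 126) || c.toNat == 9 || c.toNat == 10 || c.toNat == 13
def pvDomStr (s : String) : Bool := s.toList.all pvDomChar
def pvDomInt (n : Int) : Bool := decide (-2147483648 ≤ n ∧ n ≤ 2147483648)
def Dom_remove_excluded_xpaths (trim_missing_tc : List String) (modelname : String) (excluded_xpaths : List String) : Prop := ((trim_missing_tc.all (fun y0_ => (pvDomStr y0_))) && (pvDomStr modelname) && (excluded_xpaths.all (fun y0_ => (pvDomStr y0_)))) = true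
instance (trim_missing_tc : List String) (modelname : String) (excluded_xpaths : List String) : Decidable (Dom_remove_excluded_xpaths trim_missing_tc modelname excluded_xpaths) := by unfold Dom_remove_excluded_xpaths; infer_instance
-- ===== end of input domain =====

-- B replaces A's nested loop (build exclusion set, then set difference) by a single
-- short-circuiting filter: keep a test case unless any excluded xpath is a prefix of it.

-- ===== PORT A =====
-- A: for each excluded xpath, scan every missing test case; collect matches in a set;
-- return the set difference. trim_missing_tc is a Python set, modelled as PySem.Set.ofList.
def remove_excluded_xpaths (trim_missing_tc : List String) (modelname : String) (excluded_xpaths : List String) : List String :=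
  let miss : PySem.Set String := PySem.Set.ofList trim_missing_tc
  let trim_exception_tc : PySem.Set String :=
    excluded_xpaths.foldl (fun acc xpath =>
      miss.foldl (fun acc2 missing_tc =>
        if PySem.Str.startswith missing_tc xpath then PySem.Set.add acc2 missing_tc else acc2) acc)
      PySem.Set.empty
  PySem.Set.diff miss trim_exception_tc

-- ===== PORT B =====
-- B: one pass over the (deduplicated) missing test cases, keeping those with no excluded prefix.
def remove_excluded_xpaths_alt (trim_missing_tc : List String) (modelname : String) (excluded_xpaths : List String) : List String :=
  (PySem.Set.ofList trim_missing_tc).filter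
    (fun tc => !(excluded_xpaths.any (fun x => PySem.Str.startswith tc x)))

-- ===== PRECONDITION & SPEC =====
def Spec_remove_excluded_xpaths (trim_missing_tc : List String) (modelname : String) (excluded_xpaths : List String) (out : List String) : Prop := out = remove_excluded_xpaths_alt trim_missing_tc modelname excluded_xpaths
instance (trim_missing_tc : List String) (modelname : String) (excluded_xpaths : List String) (out : List String) : Decidable (Spec_remove_excluded_xpaths trim_missing_tc modelname excluded_xpaths out) := by unfold Spec_remove_excluded_xpaths; infer_instance

-- ===== CLAIM (what is proved, stated in full; the proofs are below) =====
def Claim_equal_remove_excluded_xpaths : Prop := ∀ (trim_missing_tc : List String) (modelname : String) (excluded_xpaths : List String), Dom_remove_excluded_xpaths trim_missing_tc modelname excluded_xpaths → Spec_remove_excluded_xpaths trim_missing_tc modelname excluded_xpaths (remove_excluded_xpaths trim_missing_tc modelname excluded_xpaths)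

-- ===== LEMMAS AND PROOFS =====

-- Membership in A's exception set: y was added iff some excluded xpath is a prefix of y and y ∈ miss.
theorem mem_exception_foldl (miss : List String) (exc : List String) (acc : PySem.Set String) (y : String) :
    y ∈ exc.foldl (fun acc xpath =>
        miss.foldl (fun acc2 tc =>
          if PySem.Str.startswith tc xpath then PySem.Set.add acc2 tc else acc2) acc) acc
      ↔ y ∈ acc ∨ ∃ x ∈ exc, y ∈ miss ∧ PySem.Str.startswith y x = true := by
  induction exc generalizing acc with
  | nil => simp
  | cons x xs ih =>
    simp only [List.foldl_cons, ih]
    rw [PySem.List.foldl_if_eq_foldl_filter]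
    have : (List.filter (fun tc => PySem.Str.startswith tc x) miss).foldl
        (fun s b => PySem.Set.add s b) acc
        = (List.filter (fun tc => PySem.Str.startswith tc x) miss).foldl
        (fun s b => PySem.Set.add s (id b)) acc := rfl
    rw [this, show (fun (s : PySem.Set String) b => PySem.Set.add s (id b))
        = (fun (s : PySem.Set String) (b : String) => s.add (id b)) from rfl]
    constructor
    · rintro (h | ⟨z, hz, hy⟩)
      · rcases (PySem.Set.mem_foldl_add _ id acc y).1 h with h | ⟨b, hb, rfl⟩
        · exact Or.inl h
        · simp only [List.mem_filter] at hb
          exact Or.inr ⟨x, by simp, hb.1, by simpa using hb.2⟩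
      · exact Or.inr ⟨z, by simp [hz], hy⟩
    · rintro (h | ⟨z, hz, hm, hs⟩)
      · exact Or.inl ((PySem.Set.mem_foldl_add _ id acc y).2 (Or.inl h))
      · rcases List.mem_cons.1 hz with rfl | hz
        · exact Or.inl ((PySem.Set.mem_foldl_add _ id acc y).2
            (Or.inr ⟨y, List.mem_filter.2 ⟨hm, hs⟩, rfl⟩))
        · exact Or.inr ⟨z, hz, hm, hs⟩

-- ===== VERDICT (by name: the statement is the Claim_ definition above) =====
theorem remove_excluded_xpaths_spec : Claim_equal_remove_excluded_xpaths := by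
  intro trim_missing_tc modelname excluded_xpaths _
  unfold Spec_remove_excluded_xpaths remove_excluded_xpaths remove_excluded_xpaths_alt
  simp only [PySem.Set.diff]
  apply List.filter_congr
  intro tc htc
  congr 1
  rw [Bool.eq_iff_iff]
  simp only [PySem.Set.contains_iff, mem_exception_foldl, PySem.Set.empty,
    List.not_mem_nil, false_or, List.any_eq_true]
  constructor
  · rintro ⟨x, hx, _, hs⟩; exact ⟨x, hx, hs⟩
  · rintro ⟨x, hx, hs⟩; exact ⟨x, hx, htc, hs⟩
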